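-- pv_equiv track=rewrite | github.com/UFRGS-CAROL/radiation-benchmarks | scripts/parsers/Parser.py | localityParser2D
-- ===== SOURCE A (Python) =====
-- import collections
--
-- def localityParser2D(errList):
--     if len(errList) < 1:
--         return [0, 0, 0, 0]
--     elif len(errList) == 1:
--         return [0, 0, 1, 0]
--     else:
--         allXPositions = [x[0] for x in errList]  # Get all positions of X
--         allYPositions = [x[1] for x in errList]  # Get all positions of Y
--         counterXPositions = collections.Counter(allXPositions)  # Count how many times each value is in the list
--         counterYPositions = collections.Counter(allYPositions)  # Count how many times each value is in the list
--         rowError = any(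
--             x > 1 for x in counterXPositions.values())  # Check if any value is in the list more than one time
--         colError = any(
--             x > 1 for x in counterYPositions.values())  # Check if any value is in the list more than one time
--         if rowError and colError:  # square error
--             return [1, 0, 0, 0]
--         elif rowError or colError:  # row/col error
--             return [0, 1, 0, 0]
--         else:  # random error
--             return [0, 0, 0, 1]
-- ===== SOURCE B (Python) =====
-- def localityParser2D(errList):
--     if len(errList) < 1:
--         return [0, 0, 0, 0]
--     elif len(errList) == 1:
--         return [0, 0, 1, 0]
--     else:
--         seenX = set()
--         seenY = set()
--         rowError = False
--         colError = False
--         for x in errList: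
--             if x[0] in seenX:
--                 rowError = True
--             else:
--                 seenX.add(x[0])
--             if x[1] in seenY:
--                 colError = True
--             else:
--                 seenY.add(x[1])
--             if rowError and colError:
--                 break
--         if rowError and colError:
--             return [1, 0, 0, 0]
--         elif rowError or colError:
--             return [0, 1, 0, 0]
--         else:
--             return [0, 0, 0, 1]
-- ===== Notes on version B (the rewrite author's own statement) =====
-- stated objective: simpler
-- what changed: Replaces the two Counter constructions followed by two any-scans over all counts with one early-exit pass that maintains two seen-sets and two duplicate flags, stopping as soon as both a repeated x and a repeated y are found.
import Mathlib
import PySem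

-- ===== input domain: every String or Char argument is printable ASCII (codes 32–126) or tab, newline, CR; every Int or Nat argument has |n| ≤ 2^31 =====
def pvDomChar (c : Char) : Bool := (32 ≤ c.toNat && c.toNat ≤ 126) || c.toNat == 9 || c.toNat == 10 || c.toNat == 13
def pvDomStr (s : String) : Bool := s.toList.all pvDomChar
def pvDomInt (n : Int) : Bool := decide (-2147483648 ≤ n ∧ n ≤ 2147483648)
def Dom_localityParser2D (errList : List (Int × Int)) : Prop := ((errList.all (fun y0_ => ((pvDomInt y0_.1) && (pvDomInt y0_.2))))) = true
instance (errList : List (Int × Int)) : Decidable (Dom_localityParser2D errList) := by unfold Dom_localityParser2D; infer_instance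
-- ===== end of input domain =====

-- B replaces A's two Counter constructions plus two any-scans over the counts by a single
-- early-exit pass maintaining two seen-sets and two duplicate flags (objective: simpler).

-- ===== PORT A =====
def localityParser2D (errList : List (Int × Int)) : List Int :=
  if errList.length < 1 then [0, 0, 0, 0]
  else if errList.length = 1 then [0, 0, 1, 0]
  else
    let allXPositions := errList.map (fun x => x.1)
    let allYPositions := errList.map (fun x => x.2)
    let counterXPositions := PySem.Dict.counter allXPositions
    let counterYPositions := PySem.Dict.counter allYPositions
    let rowError := counterXPositions.values.any (fun x => decide (x > 1))
    let colError := counterYPositions.values.any (fun x => decide (x > 1))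
    if rowError && colError then [1, 0, 0, 0]
    else if rowError || colError then [0, 1, 0, 0]
    else [0, 0, 0, 1]

-- ===== PORT B =====
-- the early-exit loop of Source B: state = (seenX, seenY, rowError, colError)
def pvLoopB : List (Int × Int) → PySem.Set Int → PySem.Set Int → Bool → Bool → Bool × Bool
  | [], _, _, r, c => (r, c)
  | x :: rest, sx, sy, r, c =>
    let r' := if PySem.Set.contains sx x.1 then true else r
    let sx' := if PySem.Set.contains sx x.1 then sx else PySem.Set.add sx x.1
    let c' := if PySem.Set.contains sy x.2 then true else c
    let sy' := if PySem.Set.contains sy x.2 then sy else PySem.Set.add sy x.2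
    if r' && c' then (r', c')
    else pvLoopB rest sx' sy' r' c'

def localityParser2D_alt (errList : List (Int × Int)) : List Int :=
  if errList.length < 1 then [0, 0, 0, 0]
  else if errList.length = 1 then [0, 0, 1, 0]
  else
    let rc := pvLoopB errList PySem.Set.empty PySem.Set.empty false false
    if rc.1 && rc.2 then [1, 0, 0, 0]
    else if rc.1 || rc.2 then [0, 1, 0, 0]
    else [0, 0, 0, 1]

-- ===== PRECONDITION & SPEC =====
def Spec_localityParser2D (errList : List (Int × Int)) (out : List Int) : Prop := out = localityParser2D_alt errList
instance (errList : List (Int × Int)) (out : List Int) : Decidable (Spec_localityParser2D errList out) := by unfold Spec_localityParser2D; infer_instance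

-- ===== CLAIM (what is proved, stated in full; the proofs are below) =====
def Claim_equal_localityParser2D : Prop := ∀ (errList : List (Int × Int)), Dom_localityParser2D errList → Spec_localityParser2D errList (localityParser2D errList)

-- ===== LEMMAS AND PROOFS =====

-- scanning l with seen set s, does some element repeat (or already lie in s)?
def pvGo (s : PySem.Set Int) : List Int → Bool
  | [] => false
  | a :: l => PySem.Set.contains s a || pvGo (PySem.Set.add s a) l

theorem pvGo_eq_not_nodup (l : List Int) (s : PySem.Set Int) (hs : s.Nodup) :
    pvGo s l = !decide (s ++ l).Nodup := by
  induction l generalizing s with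
  | nil => simp [pvGo, hs]
  | cons a l ih =>
    by_cases h : a ∈ s
    · have hdup : ¬ (s ++ a :: l).Nodup := by
        intro hn
        rw [List.nodup_append] at hn
        exact hn.2.2 a h a List.mem_cons_self rfl
      simp [pvGo, h, hdup]
    · have hadd : PySem.Set.add s a = s ++ [a] := by
        simp [PySem.Set.add, h]
      have hnd : (s ++ [a]).Nodup := by
        rw [List.nodup_append]
        refine ⟨hs, List.nodup_singleton a, ?_⟩
        intro x hx b hb
        simp at hb
        subst hb
        exact fun he => h (he ▸ hx)
      rw [pvGo, hadd, ih _ hnd]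
      simp [h, List.append_assoc]

theorem pvLoopB_eq (xs : List (Int × Int)) (sx sy : PySem.Set Int) (r c : Bool) :
    pvLoopB xs sx sy r c =
      (r || pvGo sx (xs.map (fun x => x.1)), c || pvGo sy (xs.map (fun x => x.2))) := by
  induction xs generalizing sx sy r c with
  | nil => simp [pvLoopB, pvGo]
  | cons x rest ih =>
    rw [pvLoopB]
    by_cases hx : x.1 ∈ sx <;> by_cases hy : x.2 ∈ sy <;>
      simp only [List.map_cons, pvGo, PySem.Set.contains_eq_listContains, List.contains_eq_mem,
        hx, hy, decide_true, decide_false, if_true, PySem.Set.add, ih,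
        Bool.true_and, Bool.and_true, Bool.true_or, Bool.or_true, Bool.false_or] <;>
      cases r <;> cases c <;> simp

theorem pvCounterAny (xs : List Int) :
    ((PySem.Dict.counter xs).values.any (fun v => decide (v > 1))) = !decide xs.Nodup := by
  have hv : (PySem.Dict.counter xs).values
      = (PySem.Set.ofList xs).map (fun k => (xs.count k : Int)) := by
    have h := PySem.Dict.items_counter (xs := xs)
    have : (PySem.Dict.counter xs).values = (PySem.Dict.counter xs).items.map Prod.snd := by
      simp [PySem.Dict.values]
    rw [this, h, List.map_map]
    rfl
  rw [hv, List.any_map]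
  by_cases hnd : xs.Nodup
  · simp only [hnd, decide_true, Bool.not_true]
    rw [List.any_eq_false]
    intro a _
    have := (List.nodup_iff_count_le_one.mp hnd) a
    simp
    exact_mod_cast this
  · simp only [hnd, decide_false, Bool.not_false]
    rw [List.any_eq_true]
    rw [List.nodup_iff_count_le_one] at hnd
    push_neg at hnd
    obtain ⟨a, ha⟩ := hnd
    have hmem : a ∈ xs := List.count_pos_iff.mp (by omega)
    exact ⟨a, (PySem.Set.mem_ofList (y := a) (xs := xs)).mpr hmem, by simp; exact_mod_cast ha⟩

-- ===== VERDICT (by name: the statement is the Claim_ definition above) =====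
theorem localityParser2D_spec : Claim_equal_localityParser2D := by
  intro errList _
  unfold Spec_localityParser2D localityParser2D localityParser2D_alt
  have hx := pvGo_eq_not_nodup (errList.map (fun x => x.1)) PySem.Set.empty List.nodup_nil
  have hy := pvGo_eq_not_nodup (errList.map (fun x => x.2)) PySem.Set.empty List.nodup_nil
  simp only [pvCounterAny, pvLoopB_eq]
  simp only [PySem.Set.empty] at hx hy ⊢
  simp only [List.nil_append] at hx hy
  simp only [Bool.false_or, hx, hy]
  rfl
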